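-- pv_equiv track=rewrite | github.com/timmcca-be/math-capstone | add_sets.py | add_sets
-- ===== SOURCE A (Python) =====
-- def add_sets(a, b, k):
--     if len(a) == 0:
--         return b
--     if len(b) == 0:
--         return a
--     union = a | b
--     intersection = a & b
--     return add_sets(union - intersection, {k * x for x in intersection}, k)
-- ===== SOURCE B (Python) =====
-- def add_sets(a, b, k):
--     while a and b:
--         sym = {x for x in a if x not in b} | {x for x in b if x not in a}
--         b = {k * x for x in a if x in b}
--         a = sym
--     return a or b
-- ===== Notes on version B (the rewrite author's own statement) =====
-- stated objective: idiomatic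
-- what changed: Replaces the recursion over bulk set operators (|, &, -) by an iterative while loop whose round is built from three membership-filter comprehensions (the two one-sided differences and the carried intersection), with a single 'a or b' selection after the loop; Pre_ restricts the list encodings to duplicate-free lists, i.e. to the lists that actually encode the Python set arguments.
import Mathlib
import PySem

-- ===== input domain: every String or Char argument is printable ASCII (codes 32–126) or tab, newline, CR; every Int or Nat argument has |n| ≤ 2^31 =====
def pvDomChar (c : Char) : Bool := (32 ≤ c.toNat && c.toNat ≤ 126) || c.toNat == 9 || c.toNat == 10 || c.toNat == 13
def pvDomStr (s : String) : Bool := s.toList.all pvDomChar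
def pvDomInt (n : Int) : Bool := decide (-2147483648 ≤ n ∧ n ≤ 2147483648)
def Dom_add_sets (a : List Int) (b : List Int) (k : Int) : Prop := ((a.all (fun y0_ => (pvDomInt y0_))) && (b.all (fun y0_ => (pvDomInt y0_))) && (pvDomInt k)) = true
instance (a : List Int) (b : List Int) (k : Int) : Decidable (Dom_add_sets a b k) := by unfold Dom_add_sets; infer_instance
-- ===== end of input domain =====

-- B replaces A's recursion over bulk set operators (|, &, -) by an iterative loop that builds each
-- round from membership-filter comprehensions (symmetric difference and carry computed by filtering),
-- selecting the result once after the loop (idiomatic decomposition, same cost).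



-- B-side round helpers: the three membership-filter comprehensions of one loop round
def pvSym (a b : List Int) : List Int :=
  PySem.Set.union (PySem.Set.ofList (a.filter (fun x => !PySem.Set.contains b x)))
    (PySem.Set.ofList (b.filter (fun x => !PySem.Set.contains a x)))

def pvCarry (a b : List Int) (k : Int) : List Int :=
  PySem.Set.ofList ((a.filter (fun x => PySem.Set.contains b x)).map (fun x => k * x))

-- termination measure shared by both ports: twice the set cardinalities plus a flag for a nonempty b
def pvMeasure (a : List Int) (b : List Int) : Nat :=
  2 * (a.toFinset.card + b.toFinset.card) + (if b = [] then 0 else 1)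

-- generic decrease fact both ports' steps satisfy (cited by the two step lemmas below)
theorem pvMeasure_lt (a b a' b' : List Int) (hb : b ≠ [])
    (h1 : a'.toFinset = (a.toFinset ∪ b.toFinset) \ (a.toFinset ∩ b.toFinset))
    (h2 : b'.toFinset.card ≤ (a.toFinset ∩ b.toFinset).card)
    (h3 : a.toFinset ∩ b.toFinset = ∅ → b' = []) :
    pvMeasure a' b' < pvMeasure a b := by
  have hdcard : a'.toFinset.card + (a.toFinset ∩ b.toFinset).card = (a.toFinset ∪ b.toFinset).card := by
    rw [h1]; exact Finset.card_sdiff_add_card_eq_card Finset.inter_subset_union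
  have hucard : (a.toFinset ∪ b.toFinset).card + (a.toFinset ∩ b.toFinset).card
      = a.toFinset.card + b.toFinset.card := Finset.card_union_add_card_inter _ _
  by_cases hz : a.toFinset ∩ b.toFinset = ∅
  · have hb0 : b' = [] := h3 hz
    have hi0 : (a.toFinset ∩ b.toFinset).card = 0 := by rw [hz]; rfl
    subst hb0
    simp only [pvMeasure, if_neg hb, List.toFinset_nil, Finset.card_empty]
    split_ifs with h
    · omega
    · simp at h
  · have hi1 : 1 ≤ (a.toFinset ∩ b.toFinset).card :=
      Finset.card_pos.mpr (Finset.nonempty_iff_ne_empty.mpr hz)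
    simp only [pvMeasure, if_neg hb]
    split_ifs <;> omega

-- A's round strictly decreases the measure (cited by add_sets's decreasing_by)
theorem pvMeasure_stepA (a b : List Int) (k : Int) (hb : b ≠ []) :
    pvMeasure (PySem.Set.diff (PySem.Set.union a b) (PySem.Set.inter a b))
      (PySem.Set.ofList ((PySem.Set.inter a b).map (fun x => k * x))) < pvMeasure a b := by
  apply pvMeasure_lt a b _ _ hb
  · ext x
    simp [PySem.Set.mem_diff, PySem.Set.mem_union, PySem.Set.mem_inter]
  · have hsub : (PySem.Set.ofList ((PySem.Set.inter a b).map (fun x => k * x))).toFinset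
        ⊆ (a.toFinset ∩ b.toFinset).image (fun x => k * x) := by
      intro x hx
      simp only [List.mem_toFinset, PySem.Set.mem_ofList, List.mem_map, PySem.Set.mem_inter,
        Finset.mem_image, Finset.mem_inter] at hx ⊢
      rcases hx with ⟨y, ⟨hy1, hy2⟩, rfl⟩
      exact ⟨y, ⟨hy1, hy2⟩, rfl⟩
    calc _ ≤ ((a.toFinset ∩ b.toFinset).image (fun x => k * x)).card :=
            Finset.card_le_card hsub
      _ ≤ _ := Finset.card_image_le
  · intro hz
    have hnil : PySem.Set.inter a b = [] := by
      rw [List.eq_nil_iff_forall_not_mem]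
      intro x hx
      have : x ∈ a.toFinset ∩ b.toFinset := by
        rw [PySem.Set.mem_inter] at hx
        simp [Finset.mem_inter, hx.1, hx.2]
      rw [hz] at this; simp at this
    rw [hnil]; rfl

-- B's round strictly decreases the measure (cited by add_sets_loop's decreasing_by)
theorem pvMeasure_stepB (a b : List Int) (k : Int) (hb : b ≠ []) :
    pvMeasure (pvSym a b) (pvCarry a b k) < pvMeasure a b := by
  unfold pvSym pvCarry
  apply pvMeasure_lt a b _ _ hb
  · ext x
    simp only [List.mem_toFinset, PySem.Set.mem_union, PySem.Set.mem_ofList, List.mem_filter,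
      Bool.not_eq_eq_eq_not, Bool.not_true, Finset.mem_sdiff, Finset.mem_union, Finset.mem_inter,
      PySem.Set.contains_eq_listContains, List.contains_eq_mem, decide_eq_false_iff_not]
    tauto
  · have hsub : (PySem.Set.ofList ((a.filter (fun x => PySem.Set.contains b x)).map (fun x => k * x))).toFinset
        ⊆ (a.toFinset ∩ b.toFinset).image (fun x => k * x) := by
      intro x hx
      simp only [List.mem_toFinset, PySem.Set.mem_ofList, List.mem_map, List.mem_filter,
        Finset.mem_image, Finset.mem_inter, PySem.Set.contains_eq_listContains,
        List.contains_eq_mem, decide_eq_true_eq] at hx ⊢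
      rcases hx with ⟨y, ⟨hy1, hy2⟩, rfl⟩
      exact ⟨y, ⟨by simp [hy1], by simp [hy2]⟩, rfl⟩
    calc _ ≤ ((a.toFinset ∩ b.toFinset).image (fun x => k * x)).card :=
            Finset.card_le_card hsub
      _ ≤ _ := Finset.card_image_le
  · intro hz
    have hnil : a.filter (fun x => PySem.Set.contains b x) = [] := by
      rw [List.eq_nil_iff_forall_not_mem]
      intro x hx
      rw [List.mem_filter] at hx
      have : x ∈ a.toFinset ∩ b.toFinset := by
        have hxb : x ∈ b := by simpa using hx.2
        simp [Finset.mem_inter, hx.1, hxb]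
      rw [hz] at this; simp at this
    rw [hnil]; rfl

-- ===== PORT A =====
def add_sets (a : List Int) (b : List Int) (k : Int) : List Int :=
  if a.length = 0 then b
  else if hb : b.length = 0 then a
  else
    let union := PySem.Set.union a b
    let intersection := PySem.Set.inter a b
    add_sets (PySem.Set.diff union intersection)
      (PySem.Set.ofList (intersection.map (fun x => k * x))) k
termination_by pvMeasure a b
decreasing_by exact pvMeasure_stepA a b k (by simpa using hb)

-- ===== PORT B =====
-- the 'while a and b' loop: each round is built from the three membership-filter comprehensions
def add_sets_loop (a : List Int) (b : List Int) (k : Int) : List Int × List Int :=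
  if h : a ≠ [] ∧ b ≠ [] then
    add_sets_loop (pvSym a b) (pvCarry a b k) k
  else (a, b)
termination_by pvMeasure a b
decreasing_by exact pvMeasure_stepB a b k h.2

def add_sets_alt (a : List Int) (b : List Int) (k : Int) : List Int :=
  let s := add_sets_loop a b k
  if s.1 = [] then s.2 else s.1   -- 'return a or b'

-- ===== PRECONDITION & SPEC =====
-- The parameters are Python SETS; a list with duplicate elements represents no set input at all,
-- so Pre_ restricts the lists to the duplicate-free lists (every actual input of A satisfies it).
def Pre_add_sets (a : List Int) (b : List Int) (k : Int) : Prop := a.Nodup ∧ b.Nodup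
instance (a : List Int) (b : List Int) (k : Int) : Decidable (Pre_add_sets a b k) := by unfold Pre_add_sets; infer_instance
def pvWitness_add_sets : List Int × List Int × Int := ([1, 2], [2, 3], 2)

def Spec_add_sets (a : List Int) (b : List Int) (k : Int) (out : List Int) : Prop := out = add_sets_alt a b k
instance (a : List Int) (b : List Int) (k : Int) (out : List Int) : Decidable (Spec_add_sets a b k out) := by unfold Spec_add_sets; infer_instance

-- ===== CLAIM (what is proved, stated in full; the proofs are below) =====
def Claim_equal_add_sets : Prop := ∀ (a : List Int) (b : List Int) (k : Int), Dom_add_sets a b k → Pre_add_sets a b k → Spec_add_sets a b k (add_sets a b k)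

-- ===== LEMMAS AND PROOFS =====

-- set(filter(q, xs)) = filter(q, set(xs)): ofList commutes with filter
theorem pv_ofList_filter (q : Int → Bool) (b : List Int) :
    PySem.Set.ofList (b.filter q) = (PySem.Set.ofList b).filter q := by
  induction b using List.reverseRecOn with
  | nil => rfl
  | append_singleton xs x ih =>
    rw [PySem.Set.ofList_append_singleton, PySem.Set.add_eq_ite]
    by_cases hq : q x
    · have h1 : List.filter q (xs ++ [x]) = List.filter q xs ++ [x] := by simp [hq]
      rw [h1, PySem.Set.ofList_append_singleton, PySem.Set.add_eq_ite]
      by_cases hx : x ∈ xs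
      · rw [if_pos (by simp [PySem.Set.mem_ofList, List.mem_filter, hx, hq]),
          if_pos (by simp [PySem.Set.mem_ofList, hx]), ih]
      · rw [if_neg (by simp [PySem.Set.mem_ofList, List.mem_filter, hx]),
          if_neg (by simp [PySem.Set.mem_ofList, hx]), ih, List.filter_append]
        simp [hq]
    · have h1 : List.filter q (xs ++ [x]) = List.filter q xs := by simp [hq]
      rw [h1, ih]
      by_cases hx : x ∈ xs
      · rw [if_pos (by simp [PySem.Set.mem_ofList, hx])]
      · rw [if_neg (by simp [PySem.Set.mem_ofList, hx]), List.filter_append]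
        simp [hq]

-- one round of B equals one round of A (for a duplicate-free a): the symmetric difference
theorem pv_step_eq (a b : List Int) (ha : a.Nodup) :
    pvSym a b = PySem.Set.diff (PySem.Set.union a b) (PySem.Set.inter a b) := by
  unfold pvSym
  have hfa : PySem.Set.ofList (a.filter (fun x => !PySem.Set.contains b x))
      = a.filter (fun x => !PySem.Set.contains b x) :=
    PySem.Set.ofList_eq_self_of_nodup _ (ha.filter _)
  -- left side: a's survivors, then b's new elements (disjoint, both duplicate-free)
  have hdisj : ∀ x ∈ (PySem.Set.ofList b).filter (fun x => !PySem.Set.contains a x),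
      x ∉ a.filter (fun x => !PySem.Set.contains b x) := by
    intro x hx
    simp only [List.mem_filter, PySem.Set.mem_ofList, PySem.Set.contains_eq_listContains,
      List.contains_eq_mem, Bool.not_eq_eq_eq_not, Bool.not_true, decide_eq_false_iff_not] at hx ⊢
    exact fun h => hx.2 h.1
  have hleft : PySem.Set.union (PySem.Set.ofList (a.filter (fun x => !PySem.Set.contains b x)))
      (PySem.Set.ofList (b.filter (fun x => !PySem.Set.contains a x)))
      = a.filter (fun x => !PySem.Set.contains b x)
        ++ (PySem.Set.ofList b).filter (fun x => !PySem.Set.contains a x) := by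
    rw [PySem.Set.union, hfa, pv_ofList_filter,
      PySem.Set.update_eq_append_of_disjoint _ _ ((PySem.Set.nodup_ofList b).filter _) hdisj]
  -- right side: unfold a | b as a ++ (b's new elements) and push the diff-filter through
  have hright : PySem.Set.diff (PySem.Set.union a b) (PySem.Set.inter a b)
      = a.filter (fun x => !PySem.Set.contains b x)
        ++ (PySem.Set.ofList b).filter (fun x => !PySem.Set.contains a x) := by
    rw [PySem.Set.diff, PySem.Set.union, PySem.Set.update_eq_append_filter, List.filter_append]
    congr 1
    · apply List.filter_congr
      intro x hx
      by_cases hxb : x ∈ b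
      · simp [PySem.Set.inter, List.mem_filter, hx, hxb]
      · simp [PySem.Set.inter, List.mem_filter, hxb]
    · rw [List.filter_filter]
      apply List.filter_congr
      intro x hx
      rw [PySem.Set.mem_ofList] at hx
      by_cases hxa : x ∈ a
      · simp [PySem.Set.contains_eq_listContains, hxa]
      · have hxi : x ∉ PySem.Set.inter a b := by
          rw [PySem.Set.mem_inter]; exact fun h => hxa h.1
        simp [PySem.Set.contains_eq_listContains, hxa, hxi]
  rw [hleft, hright]

-- B's loop steps once when both sides are nonempty
theorem pv_loop_step (a b : List Int) (k : Int) (h : a ≠ [] ∧ b ≠ []) :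
    add_sets_loop a b k = add_sets_loop (pvSym a b) (pvCarry a b k) k := by
  rw [add_sets_loop, dif_pos h]

theorem add_sets_eq_alt : ∀ (a b : List Int) (k : Int),
    a.Nodup → b.Nodup → add_sets a b k = add_sets_alt a b k := by
  intro a b k
  fun_induction add_sets a b k with
  | case1 a b ha =>
    intro _ _
    have h0 : a = [] := List.eq_nil_of_length_eq_zero ha
    subst h0
    simp [add_sets_alt, add_sets_loop]
  | case2 a b ha hb =>
    intro _ _
    have h0 : b = [] := List.eq_nil_of_length_eq_zero hb
    subst h0
    have ha' : a ≠ [] := by simpa using ha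
    simp [add_sets_alt, add_sets_loop, ha']
  | case3 a b ha hb u i ih =>
    intro hna hnb
    have ha' : a ≠ [] := by simpa using ha
    have hb' : b ≠ [] := by simpa using hb
    have hstep := pv_step_eq a b hna
    have hcarry : pvCarry a b k = PySem.Set.ofList ((PySem.Set.inter a b).map (fun x => k * x)) := rfl
    have hrec : add_sets_alt a b k = add_sets_alt
        (PySem.Set.diff (PySem.Set.union a b) (PySem.Set.inter a b))
        (PySem.Set.ofList ((PySem.Set.inter a b).map (fun x => k * x))) k := by
      unfold add_sets_alt
      rw [pv_loop_step a b k ⟨ha', hb'⟩, hstep, hcarry]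
    rw [hrec]
    exact ih
      (PySem.Set.nodup_diff _ _ (PySem.Set.nodup_union _ _ hna))
      (PySem.Set.nodup_ofList _)

-- ===== VERDICT (by name: the statement is the Claim_ definition above) =====
theorem add_sets_spec : Claim_equal_add_sets := by
  intro a b k _ hpre
  unfold Spec_add_sets
  exact add_sets_eq_alt a b k hpre.1 hpre.2
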